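-- pv_equiv track=rewrite | github.com/farrrell504/Noodler | src/noodler/musack/notes.py | _make_note_list
-- ===== SOURCE A (Python) =====
-- _notes = ['a','a♯','b','c','c♯','d','d♯','e','f','f♯','g','g♯']
--
-- def _make_note_list(root,only_natural=False):
--     '''returns list whose starting note is the note given'''
--     note_list = []
--
--     root = _hash_to_sharp(root)
--
--     root_idx = _notes.index(root.lower())
--
--     for idx in range(len(_notes)):
--         interval_idx = root_idx + idx
--
--         # check if we are at the end of the note alphabet,
--         # if so, start back at beginning
--         if interval_idx > len(_notes)-1:
--             interval_idx = interval_idx - len(_notes)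
--
--         new_note = _notes[interval_idx]
--         if only_natural:
--             # dont add sharps or flats
--             if len(new_note) == 1:
--                 note_list.append(new_note)
--         else:
--             note_list.append(new_note)
--
--     return note_list
--
-- def _hash_to_sharp(note):
--     return note.replace("#","♯")
-- ===== SOURCE B (Python) =====
-- _notes = ['a','a♯','b','c','c♯','d','d♯','e','f','f♯','g','g♯']
--
-- def _make_note_list(root, only_natural=False):
--     r = root.replace("#", "♯").lower()
--     pos = {n: i for i, n in enumerate(_notes)}
--     root_pos = pos[r]
--     candidates = [n for n in _notes if len(n) == 1] if only_natural else _notes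
--     return sorted(candidates, key=lambda n: (pos[n] - root_pos) % 12)
-- ===== Notes on version B (the rewrite author's own statement) =====
-- stated objective: alternative
-- what changed: Builds a note->position dictionary once and produces the result by a stable sort of the (optionally filtered) note names keyed on chromatic distance (pos[n] - pos[root]) % 12, instead of A's explicit wraparound-index loop.
import Mathlib
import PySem

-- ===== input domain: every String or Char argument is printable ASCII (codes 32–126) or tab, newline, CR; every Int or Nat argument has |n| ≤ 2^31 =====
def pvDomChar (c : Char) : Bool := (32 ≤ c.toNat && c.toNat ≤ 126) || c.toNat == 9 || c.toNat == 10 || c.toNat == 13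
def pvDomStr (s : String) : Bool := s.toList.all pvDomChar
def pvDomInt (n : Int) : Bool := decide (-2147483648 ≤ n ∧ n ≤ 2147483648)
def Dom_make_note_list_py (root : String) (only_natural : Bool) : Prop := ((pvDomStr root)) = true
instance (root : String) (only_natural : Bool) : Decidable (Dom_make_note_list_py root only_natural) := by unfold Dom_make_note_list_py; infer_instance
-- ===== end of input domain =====

-- B replaces A's wraparound-index loop by a position dictionary and a stable sort keyed on
-- the chromatic distance (pos[n] - pos[root]) % 12 (alternative decomposition, same cost).

-- module-level constant _notes, shared by both versions
def pvNotes : List String := ["a","a♯","b","c","c♯","d","d♯","e","f","f♯","g","g♯"]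

-- ===== PORT A =====
-- the for-loop of A, as a fold over range(len(_notes))
def pvLoopA (root_idx : Int) (only_natural : Bool) : List String :=
  (PySem.List.pyRange 0 (pvNotes.length : Int) 1).foldl (fun note_list idx =>
    let interval_idx := root_idx + idx
    let interval_idx :=
      if interval_idx > (pvNotes.length : Int) - 1 then interval_idx - (pvNotes.length : Int)
      else interval_idx
    let new_note := (PySem.List.pyGet? pvNotes interval_idx).getD ""  -- always in range here
    if only_natural then
      if PySem.Str.len new_note == 1 then note_list ++ [new_note] else note_list
    else note_list ++ [new_note]) []

-- A's body after normalizing the root to s = root.replace("#","♯").lower()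
def pvBodyA (s : String) (only_natural : Bool) : List String :=
  match PySem.List.index? pvNotes s with
  | none => []   -- Python raises ValueError here; excluded by Pre_
  | some root_idx => pvLoopA (root_idx : Int) only_natural

def make_note_list_py (root : String) (only_natural : Bool) : List String :=
  let root := PySem.Str.replace root "#" "♯"
  pvBodyA (PySem.Str.lower root) only_natural

-- ===== PORT B =====
-- pos = {n: i for i, n in enumerate(_notes)}
def pvPos : PySem.Dict String Int :=
  (PySem.List.enumerate pvNotes).foldl (fun d p => d.insert p.2 (p.1 : Int)) PySem.Dict.empty

-- B's body after normalizing the root to r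
def pvBodyB (r : String) (only_natural : Bool) : List String :=
  match pvPos.get? r with
  | none => []   -- Python raises KeyError here; excluded by Pre_
  | some root_pos =>
    let candidates :=
      if only_natural then pvNotes.filter (fun n => PySem.Str.len n == 1) else pvNotes
    PySem.List.sorted candidates (fun n => PySem.Int.mod (pvPos.getD n 0 - root_pos) 12) false

def make_note_list_py_alt (root : String) (only_natural : Bool) : List String :=
  pvBodyB (PySem.Str.lower (PySem.Str.replace root "#" "♯")) only_natural

-- ===== PRECONDITION & SPEC =====
-- Pre_ excludes exactly the roots whose normalized form is not a note name, where A raises ValueError.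
def Pre_make_note_list_py (root : String) (only_natural : Bool) : Prop :=
  PySem.Str.lower (PySem.Str.replace root "#" "♯") ∈ pvNotes
instance (root : String) (only_natural : Bool) : Decidable (Pre_make_note_list_py root only_natural) := by unfold Pre_make_note_list_py; infer_instance

def pvWitness_make_note_list_py : String × Bool := ("C#", false)

def Spec_make_note_list_py (root : String) (only_natural : Bool) (out : List String) : Prop := out = make_note_list_py_alt root only_natural
instance (root : String) (only_natural : Bool) (out : List String) : Decidable (Spec_make_note_list_py root only_natural out) := by unfold Spec_make_note_list_py; infer_instance

-- ===== CLAIM (what is proved, stated in full; the proofs are below) =====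
def Claim_equal_make_note_list_py : Prop := ∀ (root : String) (only_natural : Bool), Dom_make_note_list_py root only_natural → Pre_make_note_list_py root only_natural → Spec_make_note_list_py root only_natural (make_note_list_py root only_natural)

-- ===== LEMMAS AND PROOFS =====
-- for each of the 12 note names and both flags, A's loop equals B's keyed sort
lemma pvKey : ∀ s ∈ pvNotes, ∀ b : Bool, pvBodyA s b = pvBodyB s b := by decide

-- ===== VERDICT (by name: the statement is the Claim_ definition above) =====
theorem make_note_list_py_spec : Claim_equal_make_note_list_py := by
  intro root b _ hpre
  unfold Spec_make_note_list_py make_note_list_py make_note_list_py_alt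
  exact pvKey _ hpre b
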